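-- pv_equiv track=rewrite | github.com/dougfoo/gyogaido | scripts/fish_data_extractor.py | get_wikimedia_search_terms
-- ===== SOURCE A (Python) =====
-- from typing import List, Dict, Optional
--
-- def get_wikimedia_search_terms(search_term: str, scientific_name: str, image_type: str) -> List[str]:
--     """Generate appropriate search terms for different image types"""
--     base_terms = [search_term, scientific_name]
--
--     if image_type == 'natural':
--         return [f"{term}" for term in base_terms] + [f"{term} fish" for term in base_terms]
--     elif image_type == 'scientific':
--         return [f"{search_term} anatomy", f"{search_term} diagram", f"{search_term} illustration",
--                 f"{scientific_name} anatomy", f"{scientific_name} diagram", f"{scientific_name} illustration"]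
--     elif image_type == 'maps':
--         return [f"{search_term} distribution", f"{search_term} habitat", f"{search_term} range map",
--                 f"{scientific_name} distribution", f"{scientific_name} habitat", f"{scientific_name} range map"]
--     elif image_type == 'sushi':
--         return [f"{search_term} sushi", f"{search_term} sashimi", f"{search_term} nigiri",
--                 f"{scientific_name} sushi", f"{scientific_name} sashimi", f"{scientific_name} nigiri"]
--
--     return base_terms
-- ===== SOURCE B (Python) =====
-- # B: per-term expansion + interleave. Each term is independently expanded with the
-- # type's suffixes (including '' for unknown types and ['', ' fish'] for 'natural');
-- # the two expansions are then merged: interleaved (zip) for 'natural', concatenated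
-- # otherwise. No branch carries the output lists literally.
-- _SUFFIXES = {
--     'natural': ['', ' fish'],
--     'scientific': [' anatomy', ' diagram', ' illustration'],
--     'maps': [' distribution', ' habitat', ' range map'],
--     'sushi': [' sushi', ' sashimi', ' nigiri'],
-- }
--
-- def _expand(term, image_type):
--     return [term + s for s in _SUFFIXES.get(image_type, [''])]
--
-- def get_wikimedia_search_terms(search_term: str, scientific_name: str, image_type: str):
--     first = _expand(search_term, image_type)
--     second = _expand(scientific_name, image_type)
--     if image_type == 'natural':
--         return [x for pair in zip(first, second) for x in pair]
--     return first + second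
-- ===== Notes on version B (the rewrite author's own statement) =====
-- stated objective: alternative
-- what changed: Instead of four branches each listing the full output, B expands each term independently against a suffix list (empty suffix for unknown types, ['', ' fish'] for 'natural') and then merges the two per-term expansions, interleaving them with zip for 'natural' and concatenating otherwise.
import Mathlib
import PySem

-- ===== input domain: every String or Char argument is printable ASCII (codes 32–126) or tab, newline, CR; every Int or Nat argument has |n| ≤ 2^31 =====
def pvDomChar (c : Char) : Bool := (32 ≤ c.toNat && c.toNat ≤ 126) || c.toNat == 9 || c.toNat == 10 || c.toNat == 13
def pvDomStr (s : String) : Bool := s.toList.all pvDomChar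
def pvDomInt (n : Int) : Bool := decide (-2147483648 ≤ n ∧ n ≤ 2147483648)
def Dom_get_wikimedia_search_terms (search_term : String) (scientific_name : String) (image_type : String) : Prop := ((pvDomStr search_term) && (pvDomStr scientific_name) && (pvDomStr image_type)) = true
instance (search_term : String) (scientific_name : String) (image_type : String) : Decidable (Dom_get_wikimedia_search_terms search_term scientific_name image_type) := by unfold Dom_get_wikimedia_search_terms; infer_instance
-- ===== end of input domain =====

-- B expands each term independently with a suffix list and merges the two expansions (zip-interleave for 'natural', concatenation otherwise); return value only, no side effects.


-- ===== PORT A =====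
def get_wikimedia_search_terms (search_term : String) (scientific_name : String) (image_type : String) : List String :=
  let base_terms := [search_term, scientific_name]
  if image_type == "natural" then
    (base_terms.map (fun term => term)) ++ (base_terms.map (fun term => term ++ " fish"))
  else if image_type == "scientific" then
    [search_term ++ " anatomy", search_term ++ " diagram", search_term ++ " illustration",
     scientific_name ++ " anatomy", scientific_name ++ " diagram", scientific_name ++ " illustration"]
  else if image_type == "maps" then
    [search_term ++ " distribution", search_term ++ " habitat", search_term ++ " range map",
     scientific_name ++ " distribution", scientific_name ++ " habitat", scientific_name ++ " range map"]
  else if image_type == "sushi" then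
    [search_term ++ " sushi", search_term ++ " sashimi", search_term ++ " nigiri",
     scientific_name ++ " sushi", scientific_name ++ " sashimi", scientific_name ++ " nigiri"]
  else base_terms

-- ===== PORT B =====
-- port of _SUFFIXES (a dict -> PySem.Dict association list)
def pvSuffixes : PySem.Dict String (List String) :=
  PySem.Dict.ofList
  [("natural", ["", " fish"]),
   ("scientific", [" anatomy", " diagram", " illustration"]),
   ("maps", [" distribution", " habitat", " range map"]),
   ("sushi", [" sushi", " sashimi", " nigiri"])]

-- port of _expand
def pvExpand (term : String) (image_type : String) : List String :=
  (PySem.Dict.getD pvSuffixes image_type [""]).map (fun s => term ++ s)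

def get_wikimedia_search_terms_alt (search_term : String) (scientific_name : String) (image_type : String) : List String :=
  let first := pvExpand search_term image_type
  let second := pvExpand scientific_name image_type
  if image_type == "natural" then
    (first.zip second).flatMap (fun pair => [pair.1, pair.2])
  else first ++ second

-- ===== PRECONDITION & SPEC =====
def Spec_get_wikimedia_search_terms (search_term : String) (scientific_name : String) (image_type : String) (out : List String) : Prop := out = get_wikimedia_search_terms_alt search_term scientific_name image_type
instance (search_term : String) (scientific_name : String) (image_type : String) (out : List String) : Decidable (Spec_get_wikimedia_search_terms search_term scientific_name image_type out) := by unfold Spec_get_wikimedia_search_terms; infer_instance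

-- ===== CLAIM =====
def Claim_equal_get_wikimedia_search_terms : Prop := ∀ (search_term : String) (scientific_name : String) (image_type : String), Dom_get_wikimedia_search_terms search_term scientific_name image_type → Spec_get_wikimedia_search_terms search_term scientific_name image_type (get_wikimedia_search_terms search_term scientific_name image_type)

-- ===== LEMMAS AND PROOFS =====

theorem pvSuffixes_items : pvSuffixes.items =
  [("natural", ["", " fish"]),
   ("scientific", [" anatomy", " diagram", " illustration"]),
   ("maps", [" distribution", " habitat", " range map"]),
   ("sushi", [" sushi", " sashimi", " nigiri"])] := by decide

-- ===== VERDICT =====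
theorem get_wikimedia_search_terms_spec : Claim_equal_get_wikimedia_search_terms := by
  intro search_term scientific_name image_type _
  show _ = _
  simp only [get_wikimedia_search_terms, get_wikimedia_search_terms_alt, pvExpand,
    PySem.Dict.getD, PySem.Dict.get?, pvSuffixes_items]
  split_ifs with h1 h2 h3 h4
  · obtain rfl : image_type = "natural" := by simpa using h1
    simp [List.find?, String.append_empty]
  · obtain rfl : image_type = "scientific" := by simpa using h2
    simp [List.find?]
  · obtain rfl : image_type = "maps" := by simpa using h3
    simp [List.find?]
  · obtain rfl : image_type = "sushi" := by simpa using h4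
    simp [List.find?]
  · have e1 : ("natural" == image_type) = false :=
      beq_eq_false_iff_ne.mpr (Ne.symm (fun h => h1 (by rw [h]; rfl)))
    have e2 : ("scientific" == image_type) = false :=
      beq_eq_false_iff_ne.mpr (Ne.symm (fun h => h2 (by rw [h]; rfl)))
    have e3 : ("maps" == image_type) = false :=
      beq_eq_false_iff_ne.mpr (Ne.symm (fun h => h3 (by rw [h]; rfl)))
    have e4 : ("sushi" == image_type) = false :=
      beq_eq_false_iff_ne.mpr (Ne.symm (fun h => h4 (by rw [h]; rfl)))
    simp [List.find?, e1, e2, e3, e4, String.append_empty]
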